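-- pv_equiv track=rewrite | github.com/ikhsanmasu/agentic_chatbot | backend/app/agents/report/pdf.py | _wrap_long_tokens
-- ===== SOURCE A (Python) =====
-- _MAX_TOKEN_LEN = 40
--
-- def _wrap_long_tokens(line: str, max_len: int = _MAX_TOKEN_LEN) -> str:
--     if not line:
--         return line
--     words = line.split(" ")
--     wrapped: list[str] = []
--     for word in words:
--         if len(word) <= max_len:
--             wrapped.append(word)
--             continue
--         chunks = [word[i : i + max_len] for i in range(0, len(word), max_len)]
--         wrapped.append(" ".join(chunks))
--     return " ".join(wrapped)
-- ===== SOURCE B (Python) =====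
-- _MAX_TOKEN_LEN = 40
--
-- def _wrap_long_tokens(line: str, max_len: int = _MAX_TOKEN_LEN) -> str:
--     # single pass over the characters: count the run of non-space chars since
--     # the last break and insert a space whenever the run would exceed max_len
--     if not line:
--         return line
--     out = []
--     count = 0
--     for ch in line:
--         if ch == " ":
--             out.append(ch)
--             count = 0
--         elif count == max_len:
--             out.append(" ")
--             out.append(ch)
--             count = 1
--         else:
--             out.append(ch)
--             count += 1
--     return "".join(out)
-- ===== Notes on version B (the rewrite author's own statement) =====
-- stated objective: alternative
-- what changed: Replaces A's split-into-words, slice-each-long-word-into-chunks and double space-join pipeline by a single left-to-right character scan that keeps a counter of the non-space run since the last break and inserts a space whenever the run would exceed max_len.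
-- outside the precondition, e.g. on _wrap_long_tokens('ab', -1): A returns '', B returns 'ab'
import Mathlib
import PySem

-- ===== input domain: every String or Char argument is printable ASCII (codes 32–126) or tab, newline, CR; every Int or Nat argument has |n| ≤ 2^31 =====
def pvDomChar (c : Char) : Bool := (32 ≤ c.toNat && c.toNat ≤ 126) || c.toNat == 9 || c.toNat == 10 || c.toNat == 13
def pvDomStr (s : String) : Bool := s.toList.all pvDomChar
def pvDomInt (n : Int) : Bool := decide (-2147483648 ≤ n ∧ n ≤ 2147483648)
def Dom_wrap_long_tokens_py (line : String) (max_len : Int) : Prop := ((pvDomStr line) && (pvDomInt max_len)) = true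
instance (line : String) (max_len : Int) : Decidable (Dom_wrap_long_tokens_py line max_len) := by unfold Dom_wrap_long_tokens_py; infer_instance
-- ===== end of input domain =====

-- B replaces A's split-words / slice-into-chunks / double-join pipeline by a single
-- character scan that counts the run of non-space characters since the last break
-- (objective: alternative decomposition, same O(n) cost).

-- ===== PORT A =====
def wrap_long_tokens_py (line : String) (max_len : Int) : String :=
  if line = "" then line
  else
    let words := PySem.Chars.splitOn line.toList [' ']
    let wrapped := words.foldl
      (fun (acc : List (List Char)) word =>
        if PySem.Chars.len word ≤ max_len then acc ++ [word]
        else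
          let chunks := (PySem.List.pyRange 0 (PySem.Chars.len word) max_len).map
            (fun i => PySem.Chars.slice word (some i) (some (i + max_len)))
          acc ++ [PySem.Chars.join [' '] chunks]) []
    String.ofList (PySem.Chars.join [' '] wrapped)

-- ===== PORT B =====
def wrap_long_tokens_py_alt (line : String) (max_len : Int) : String :=
  if line = "" then line
  else
    let r := line.toList.foldl
      (fun (st : List Char × Int) ch =>
        if ch = ' ' then (st.1 ++ [ch], 0)
        else if st.2 = max_len then (st.1 ++ [' ', ch], 1)
        else (st.1 ++ [ch], st.2 + 1))
      ([], 0)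
    String.ofList r.1

-- ===== PRECONDITION & SPEC =====
-- Pre_ excludes max_len ≤ 0, where a maximum token length is meaningless and neither
-- behaviour is specified: at max_len = 0 A raises ValueError (range step 0) on any line
-- containing a non-space character, and for negative max_len A's empty chunk list erases
-- every word while B leaves the line unchanged.
def Pre_wrap_long_tokens_py (line : String) (max_len : Int) : Prop := 1 ≤ max_len
instance (line : String) (max_len : Int) : Decidable (Pre_wrap_long_tokens_py line max_len) := by unfold Pre_wrap_long_tokens_py; infer_instance
def pvWitness_wrap_long_tokens_py : String × Int := ("aaa b", 2)
def Spec_wrap_long_tokens_py (line : String) (max_len : Int) (out : String) : Prop := out = wrap_long_tokens_py_alt line max_len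
instance (line : String) (max_len : Int) (out : String) : Decidable (Spec_wrap_long_tokens_py line max_len out) := by unfold Spec_wrap_long_tokens_py; infer_instance

-- ===== CLAIM (what is proved, stated in full; the proofs are below) =====
def Claim_equal_wrap_long_tokens_py : Prop := ∀ (line : String) (max_len : Int), Dom_wrap_long_tokens_py line max_len → Pre_wrap_long_tokens_py line max_len → Spec_wrap_long_tokens_py line max_len (wrap_long_tokens_py line max_len)

-- ===== LEMMAS AND PROOFS =====

-- B's scan as a structural recursion (the foldl's output, without the accumulator)
def scanB (m : Int) : Int → List Char → List Char
  | _, [] => []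
  | c, ch :: t =>
    if ch = ' ' then ch :: scanB m 0 t
    else if c = m then ' ' :: ch :: scanB m 1 t
    else ch :: scanB m (c + 1) t

-- A's per-word transform (exactly the body of A's loop)
def wrapW (m : Int) (w : List Char) : List Char :=
  if PySem.Chars.len w ≤ m then w
  else PySem.Chars.join [' ']
    ((PySem.List.pyRange 0 (PySem.Chars.len w) m).map
      (fun i => PySem.Chars.slice w (some i) (some (i + m))))

-- simple recursive model of str.split(" ")
def splitSp : List Char → List (List Char)
  | [] => [[]]
  | c :: t => if c = ' ' then [] :: splitSp t else (splitSp t).modifyHead (c :: ·)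

-- chunking with step k+1
def chunkRec (k : ℕ) : List Char → List (List Char)
  | [] => []
  | c :: t => (c :: t).take (k+1) :: chunkRec k (t.drop k)
termination_by w => w.length
decreasing_by simp [List.length_drop]

theorem foldlB_eq (m : Int) (l : List Char) (acc : List Char) (c : Int) :
    (l.foldl
      (fun (st : List Char × Int) ch =>
        if ch = ' ' then (st.1 ++ [ch], 0)
        else if st.2 = m then (st.1 ++ [' ', ch], 1)
        else (st.1 ++ [ch], st.2 + 1))
      (acc, c)).1 = acc ++ scanB m c l := by
  induction l generalizing acc c with
  | nil => simp [scanB]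
  | cons ch t ih =>
    simp only [List.foldl_cons, scanB]
    split_ifs with h1 h2 <;> simp [ih]

theorem splitSp_ne_nil (l : List Char) : splitSp l ≠ [] := by
  induction l with
  | nil => simp [splitSp]
  | cons c t ih =>
    simp only [splitSp]
    split_ifs
    · simp
    · cases h : splitSp t with
      | nil => exact absurd h ih
      | cons a b => simp [List.modifyHead]

theorem go_spec (l : List Char) : ∀ (fuel : ℕ), l.length ≤ fuel → ∀ (cur : List Char) (acc : List (List Char)),
    PySem.Chars.splitOn.go [' '] fuel l cur acc
      = acc.reverse ++ (splitSp l).modifyHead (cur.reverse ++ ·) := by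
  induction l with
  | nil =>
    intro fuel _ cur acc
    cases fuel <;> simp [PySem.Chars.splitOn.go, splitSp, List.modifyHead]
  | cons c t ih =>
    intro fuel hf cur acc
    cases fuel with
    | zero => simp at hf
    | succ f =>
      by_cases hc : c = ' '
      · subst hc
        rw [show PySem.Chars.splitOn.go [' '] (f+1) (' ' :: t) cur acc
              = PySem.Chars.splitOn.go [' '] f t [] (cur.reverse :: acc) by
            simp [PySem.Chars.splitOn.go]]
        rw [ih f (by simpa using hf) [] (cur.reverse :: acc)]
        simp only [splitSp, List.modifyHead, List.reverse_cons, List.reverse_nil,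
          List.nil_append, List.append_assoc]
        simp
        cases splitSp t <;> rfl
      · rw [show PySem.Chars.splitOn.go [' '] (f+1) (c :: t) cur acc
              = PySem.Chars.splitOn.go [' '] f t (c :: cur) acc by
            simp [PySem.Chars.splitOn.go, List.isPrefixOf]
            intro h; exact absurd h.symm hc]
        rw [ih f (by simpa using hf) (c :: cur) acc]
        simp only [splitSp, if_neg hc]
        congr 1
        cases h : splitSp t with
        | nil => exact absurd h (splitSp_ne_nil t)
        | cons a b => simp [List.modifyHead]

theorem splitOn_eq (l : List Char) : PySem.Chars.splitOn l [' '] = splitSp l := by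
  unfold PySem.Chars.splitOn
  rw [go_spec l (l.length + 1) (by omega) [] []]
  cases h : splitSp l with
  | nil => exact absurd h (splitSp_ne_nil l)
  | cons a b => simp [List.modifyHead]

theorem foldlA_eq (m : Int) (ws : List (List Char)) (acc : List (List Char)) :
    (ws.foldl
      (fun (acc : List (List Char)) word =>
        if PySem.Chars.len word ≤ m then acc ++ [word]
        else acc ++ [PySem.Chars.join [' ']
          ((PySem.List.pyRange 0 (PySem.Chars.len word) m).map
            (fun i => PySem.Chars.slice word (some i) (some (i + m))))]) acc)
      = acc ++ ws.map (wrapW m) := by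
  induction ws generalizing acc with
  | nil => simp
  | cons w t ih =>
    simp only [List.foldl_cons, List.map_cons]
    rw [show (if PySem.Chars.len w ≤ m then acc ++ [w]
        else acc ++ [PySem.Chars.join [' ']
          ((PySem.List.pyRange 0 (PySem.Chars.len w) m).map
            (fun i => PySem.Chars.slice w (some i) (some (i + m))))]) = acc ++ [wrapW m w] by
      unfold wrapW; split_ifs <;> rfl]
    rw [ih]
    simp

theorem pyRange_pos_nil (a b s : Int) (hs : 0 < s) (h : b ≤ a) :
    PySem.List.pyRange a b s = [] := by
  rw [PySem.List.pyRange_of_pos _ _ hs, if_neg (by omega)]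
  simp

theorem pyRange_pos_cons (a b s : Int) (hs : 0 < s) (h : a < b) :
    PySem.List.pyRange a b s = a :: PySem.List.pyRange (a + s) b s := by
  rw [PySem.List.pyRange_of_pos _ _ hs, PySem.List.pyRange_of_pos _ _ hs, if_pos h]
  by_cases h2 : a + s < b
  · rw [if_pos h2]
    have he : b - a + s - 1 = (b - (a + s) + s - 1) + 1 * s := by ring
    have hq : (b - a + s - 1) / s = (b - (a + s) + s - 1) / s + 1 := by
      rw [he, Int.add_mul_ediv_right _ _ (by omega)]
    have hnn : 0 ≤ (b - (a + s) + s - 1) / s := Int.ediv_nonneg (by omega) (by omega)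
    rw [hq, Int.toNat_add hnn (by omega)]
    rw [show ((b - (a+s) + s - 1)/s).toNat + (1:Int).toNat = ((b - (a+s) + s - 1)/s).toNat + 1 by rfl]
    rw [List.range_succ_eq_map]
    simp only [List.map_cons, List.map_map]
    congr 1
    · simp
    · apply List.map_congr_left
      intro k _
      simp [Function.comp, Nat.succ_eq_add_one]
      push_cast
      ring
  · rw [if_neg h2]
    have h3 : b - a - 1 < s := by omega
    have he : b - a + s - 1 = (b - a - 1) + 1 * s := by ring
    have hq : (b - a + s - 1) / s = 1 := by
      rw [he, Int.add_mul_ediv_right _ _ (by omega),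
        Int.ediv_eq_zero_of_lt (by omega) h3]
      norm_num
    rw [hq]
    simp

theorem chunkRec_nil (k : ℕ) : chunkRec k [] = [] := by
  rw [chunkRec]

theorem chunkRec_cons (k : ℕ) (w : List Char) (hw : w ≠ []) :
    chunkRec k w = w.take (k+1) :: chunkRec k (w.drop (k+1)) := by
  cases w with
  | nil => exact absurd rfl hw
  | cons c t => rw [chunkRec, List.drop_succ_cons]

theorem L1 (mN : ℕ) (hm : 1 ≤ mN) (w : List Char) :
    ∀ (k aN : ℕ), w.length - aN ≤ k →
    (PySem.List.pyRange (aN : Int) (w.length : Int) (mN : Int)).map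
        (fun i => PySem.Chars.slice w (some i) (some (i + (mN : Int))))
      = chunkRec (mN - 1) (w.drop aN) := by
  intro k
  induction k with
  | zero =>
    intro aN h
    have hle : w.length ≤ aN := by omega
    rw [pyRange_pos_nil _ _ _ (by exact_mod_cast hm) (by exact_mod_cast hle)]
    rw [List.drop_eq_nil_of_le hle]
    simp [chunkRec_nil]
  | succ k ih =>
    intro aN h
    by_cases hlt : aN < w.length
    · rw [pyRange_pos_cons _ _ _ (by exact_mod_cast hm) (by exact_mod_cast hlt)]
      simp only [List.map_cons]
      rw [chunkRec_cons _ _ (by simp [List.drop_eq_nil_iff]; omega)]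
      have hk1 : mN - 1 + 1 = mN := by omega
      rw [hk1]
      congr 1
      · show PySem.Chars.slice w (some (aN : Int)) (some ((aN : Int) + (mN : Int))) = _
        simp only [PySem.Chars.slice]
        rw [PySem.List.slice_natCast_add w aN mN]
      · rw [show ((aN : Int) + (mN : Int)) = ((aN + mN : ℕ) : Int) by push_cast; ring]
        rw [ih (aN + mN) (by omega)]
        congr 1
        rw [List.drop_drop]
    · have hle : w.length ≤ aN := by omega
      rw [pyRange_pos_nil _ _ _ (by exact_mod_cast hm) (by exact_mod_cast hle)]
      rw [List.drop_eq_nil_of_le hle]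
      simp [chunkRec_nil]

theorem S1 (mN : ℕ) (w : List Char) (hw : ' ' ∉ w) :
    ∀ c : Int, c + (w.length : Int) ≤ (mN : Int) → scanB (mN : Int) c w = w := by
  induction w with
  | nil => intro c _; rfl
  | cons ch t ih =>
    intro c hc
    have hch : ch ≠ ' ' := fun h => hw (by simp [h])
    have hcm : c ≠ (mN : Int) := by
      intro h; subst h; simp at hc; omega
    rw [scanB, if_neg hch, if_neg hcm]
    congr 1
    exact ih (fun h => hw (List.mem_cons_of_mem _ h)) (c + 1) (by simp at hc ⊢; omega)

theorem S2 (mN : ℕ) (hm : 1 ≤ mN) (w : List Char) (hw : ' ' ∉ w) :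
    ∀ c : Int, 0 ≤ c → c ≤ (mN : Int) → (mN : Int) < c + (w.length : Int) →
    scanB (mN : Int) c w
      = w.take ((mN : Int) - c).toNat ++ ' ' :: scanB (mN : Int) 0 (w.drop ((mN : Int) - c).toNat) := by
  induction w with
  | nil => intro c _ hc2 hc3; simp at hc3; omega
  | cons ch t ih =>
    intro c hc1 hc2 hc3
    have hch : ch ≠ ' ' := fun h => hw (by simp [h])
    by_cases hcm : c = (mN : Int)
    · subst hcm
      simp only [sub_self, Int.toNat_zero, List.take_zero, List.drop_zero, List.nil_append]
      rw [scanB, if_neg hch, if_pos rfl]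
      rw [scanB, if_neg hch, if_neg (by omega)]
      norm_num
    · rw [scanB, if_neg hch, if_neg hcm]
      have htn : ((mN : Int) - c).toNat = ((mN : Int) - (c+1)).toNat + 1 := by omega
      rw [htn, List.take_succ_cons, List.drop_succ_cons]
      rw [ih (fun h => hw (List.mem_cons_of_mem _ h)) (c+1) (by omega) (by omega) (by simp at hc3 ⊢; omega)]
      simp

theorem L2 (mN : ℕ) (hm : 1 ≤ mN) :
    ∀ (n : ℕ) (w : List Char), w.length ≤ n → ' ' ∉ w →
    PySem.Chars.join [' '] (chunkRec (mN - 1) w) = scanB (mN : Int) 0 w := by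
  intro n
  induction n with
  | zero =>
    intro w hlen _
    have : w = [] := List.eq_nil_of_length_eq_zero (by omega)
    subst this
    simp [chunkRec_nil, scanB, PySem.Chars.join_nil]
  | succ n ih =>
    intro w hlen hw
    cases hwn : w with
    | nil => simp [chunkRec_nil, scanB, PySem.Chars.join_nil]
    | cons c t =>
      rw [← hwn]
      have hwne : w ≠ [] := by rw [hwn]; simp
      rw [chunkRec_cons _ _ hwne, show mN - 1 + 1 = mN by omega]
      by_cases hle : w.length ≤ mN
      · rw [List.drop_eq_nil_of_le hle]
        simp only [chunkRec]
        rw [PySem.Chars.join_singleton, List.take_of_length_le hle]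
        rw [S1 mN w hw 0 (by simp; omega)]
      · have hdne : w.drop mN ≠ [] := by simp [List.drop_eq_nil_iff]; omega
        have hchunk : ∃ a b, chunkRec (mN - 1) (w.drop mN) = a :: b := by
          rw [chunkRec_cons _ _ hdne]; exact ⟨_, _, rfl⟩
        obtain ⟨a, b, hab⟩ := hchunk
        rw [hab, PySem.Chars.join_cons_cons, ← hab]
        rw [ih (w.drop mN) (by simp; omega) (fun h => hw (List.mem_of_mem_drop h))]
        rw [S2 mN hm w hw 0 le_rfl (by omega) (by omega)]
        simp

theorem wordLemma (mN : ℕ) (hm : 1 ≤ mN) (w : List Char) (hw : ' ' ∉ w) :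
    scanB (mN : Int) 0 w = wrapW (mN : Int) w := by
  unfold wrapW
  rw [PySem.Chars.len_eq]
  by_cases hle : (w.length : Int) ≤ (mN : Int)
  · rw [if_pos hle, S1 mN w hw 0 (by omega)]
  · rw [if_neg hle]
    rw [show ((0 : Int)) = ((0 : ℕ) : Int) by rfl]
    rw [L1 mN hm w w.length 0 (by omega)]
    rw [List.drop_zero]
    exact (L2 mN hm w.length w le_rfl hw).symm

theorem scanB_append (mN : ℕ) (w rest : List Char) (hw : ' ' ∉ w) :
    ∀ c : Int, scanB (mN : Int) c (w ++ ' ' :: rest)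
      = scanB (mN : Int) c w ++ ' ' :: scanB (mN : Int) 0 rest := by
  induction w with
  | nil => intro c; simp [scanB]
  | cons ch t ih =>
    intro c
    have hch : ch ≠ ' ' := fun h => hw (by simp [h])
    have hw' : ' ' ∉ t := fun h => hw (List.mem_cons_of_mem _ h)
    simp only [List.cons_append, scanB, if_neg hch]
    split_ifs with h
    · simp [ih hw']
    · simp [ih hw']

theorem splitSp_no_space (l : List Char) (h : ' ' ∉ l) : splitSp l = [l] := by
  induction l with
  | nil => rfl
  | cons c t ih =>
    have hc : c ≠ ' ' := fun hh => h (by simp [hh])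
    rw [splitSp, if_neg hc, ih (fun hh => h (List.mem_cons_of_mem _ hh))]
    simp [List.modifyHead]

theorem splitSp_append (w rest : List Char) (hw : ' ' ∉ w) :
    splitSp (w ++ ' ' :: rest) = w :: splitSp rest := by
  induction w with
  | nil => simp [splitSp]
  | cons c t ih =>
    have hc : c ≠ ' ' := fun hh => hw (by simp [hh])
    rw [List.cons_append, splitSp, if_neg hc, ih (fun hh => hw (List.mem_cons_of_mem _ hh))]
    simp [List.modifyHead]

theorem dropWhile_head_false {α : Type} (p : α → Bool) :
    ∀ (l : List α) (x : α) (xs : List α), l.dropWhile p = x :: xs → p x = false := by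
  intro l
  induction l with
  | nil => intro x xs h; simp at h
  | cons c t ih =>
    intro x xs h
    rw [List.dropWhile_cons] at h
    split_ifs at h with hp
    · exact ih x xs h
    · cases h; simpa using hp

theorem main_chars (mN : ℕ) (hm : 1 ≤ mN) :
    ∀ (n : ℕ) (l : List Char), l.length ≤ n →
    PySem.Chars.join [' '] ((splitSp l).map (wrapW (mN : Int))) = scanB (mN : Int) 0 l := by
  intro n
  induction n with
  | zero =>
    intro l hlen
    have : l = [] := List.eq_nil_of_length_eq_zero (by omega)
    subst this
    simp [splitSp, scanB, wrapW, PySem.Chars.join_singleton, PySem.Chars.len]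
  | succ n ih =>
    intro l hlen
    by_cases hsp : ' ' ∈ l
    · have hdec := List.takeWhile_append_dropWhile (p := fun c => c ≠ ' ') (l := l)
      set w := l.takeWhile (fun c => c ≠ ' ') with hwdef
      have hwns : ' ' ∉ w := by
        intro h
        have := List.mem_takeWhile_imp h
        simp at this
      cases hd : l.dropWhile (fun c => c ≠ ' ') with
      | nil =>
        exfalso
        rw [List.dropWhile_eq_nil_iff] at hd
        have := hd ' ' hsp
        simp at this
      | cons x xs =>
        have hx : x = ' ' := by
          have := dropWhile_head_false (fun c => decide (c ≠ ' ')) l x xs hd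
          simpa using this
        subst hx
        have hl : l = w ++ ' ' :: xs := by rw [← hdec, hd]
        rw [hl, splitSp_append w xs hwns, scanB_append mN w xs hwns 0]
        have hlenxs : xs.length ≤ n := by
          have : l.length = w.length + 1 + xs.length := by rw [hl]; simp; omega
          omega
        rw [List.map_cons]
        cases hsx : splitSp xs with
        | nil => exact absurd hsx (splitSp_ne_nil xs)
        | cons a b =>
          rw [List.map_cons, PySem.Chars.join_cons_cons, ← List.map_cons, ← hsx]
          rw [ih xs hlenxs, wordLemma mN hm w hwns]
          simp
    · rw [splitSp_no_space l hsp]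
      simp only [List.map_cons, List.map_nil]
      rw [PySem.Chars.join_singleton, wordLemma mN hm l hsp]

-- ===== VERDICT (by name: the statement is the Claim_ definition above) =====
theorem wrap_long_tokens_py_spec : Claim_equal_wrap_long_tokens_py := by
  intro line max_len _ hpre
  unfold Pre_wrap_long_tokens_py at hpre
  unfold Spec_wrap_long_tokens_py
  obtain ⟨mN, hmn, rfl⟩ : ∃ mN : ℕ, 1 ≤ mN ∧ max_len = (mN : Int) :=
    ⟨max_len.toNat, by omega, by omega⟩
  by_cases hline : line = ""
  · simp [wrap_long_tokens_py, wrap_long_tokens_py_alt, hline]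
  · simp only [wrap_long_tokens_py, wrap_long_tokens_py_alt, if_neg hline]
    congr 1
    rw [foldlB_eq, List.nil_append, splitOn_eq, foldlA_eq, List.nil_append]
    exact (main_chars mN hmn line.toList.length line.toList le_rfl)
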